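-- pv_equiv track=rewrite | github.com/Scartiloffista/aoc | 2022/15.2.py | mark_occupied
-- ===== SOURCE A (Python) =====
-- def add_tuples(a,b):
--     return tuple(map(sum, zip(a, b)))
--
-- def taxicab_dist(a,b):
--
--     ax, ay = a
--     bx, by = b
--     return abs(ax - bx) + abs(ay - by)
--
-- def mark_occupied(sensor, beacon, distance):
--
--     occupied = set()
--
--     for x in range(-distance, distance+1):
--         for y in range(-distance, distance+1):
--             candidate = add_tuples(sensor, (x,y))
--             if taxicab_dist(candidate, sensor) <= distance:
--                 occupied.add(candidate)
--
--     return occupied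
-- ===== SOURCE B (Python) =====
-- def mark_occupied(sensor, beacon, distance):
--     sx, sy = sensor
--     occupied = set()
--     for dx in range(-distance, distance + 1):
--         w = distance - abs(dx)
--         for dy in range(-w, w + 1):
--             occupied.add((sx + dx, sy + dy))
--     return occupied
-- ===== Notes on version B (the rewrite author's own statement) =====
-- stated objective: alternative
-- what changed: B enumerates the diamond directly, computing each row's half-width w = distance - |dx| in closed form, instead of scanning the full (2d+1)^2 square and filtering each cell with a taxicab-distance test via helper calls; the distance test and helper functions disappear.
import Mathlib
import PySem

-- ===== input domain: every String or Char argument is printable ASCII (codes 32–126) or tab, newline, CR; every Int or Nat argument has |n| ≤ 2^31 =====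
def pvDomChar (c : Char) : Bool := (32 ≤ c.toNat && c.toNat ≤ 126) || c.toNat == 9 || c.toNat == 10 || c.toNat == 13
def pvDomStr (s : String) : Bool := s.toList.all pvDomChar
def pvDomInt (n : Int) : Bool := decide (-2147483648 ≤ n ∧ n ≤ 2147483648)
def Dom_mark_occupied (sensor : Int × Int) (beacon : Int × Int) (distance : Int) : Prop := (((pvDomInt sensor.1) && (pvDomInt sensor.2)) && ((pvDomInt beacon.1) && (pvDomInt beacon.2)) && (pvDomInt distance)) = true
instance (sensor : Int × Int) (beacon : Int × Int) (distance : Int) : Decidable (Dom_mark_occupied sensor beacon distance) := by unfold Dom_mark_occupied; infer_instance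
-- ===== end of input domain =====

-- B enumerates the diamond directly with a closed-form row half-width (distance - |dx|),
-- instead of scanning the full (2d+1)^2 square and filtering each cell by a taxicab-distance test.

-- ===== PORT A =====
-- tuple(map(sum, zip(a, b))) on two pairs is exactly componentwise addition
def add_tuples (a : Int × Int) (b : Int × Int) : Int × Int := (a.1 + b.1, a.2 + b.2)

def taxicab_dist (a : Int × Int) (b : Int × Int) : Int := |a.1 - b.1| + |a.2 - b.2|

def mark_occupied (sensor : Int × Int) (beacon : Int × Int) (distance : Int) : List (Int × Int) :=
  (PySem.List.pyRange (-distance) (distance + 1) 1).foldl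
    (fun occupied x =>
      (PySem.List.pyRange (-distance) (distance + 1) 1).foldl
        (fun occupied y =>
          let candidate := add_tuples sensor (x, y)
          if taxicab_dist candidate sensor ≤ distance then PySem.Set.add occupied candidate
          else occupied)
        occupied)
    PySem.Set.empty

-- ===== PORT B =====
def mark_occupied_alt (sensor : Int × Int) (beacon : Int × Int) (distance : Int) : List (Int × Int) :=
  let sx := sensor.1
  let sy := sensor.2
  (PySem.List.pyRange (-distance) (distance + 1) 1).foldl
    (fun occupied dx =>
      let w := distance - |dx|
      (PySem.List.pyRange (-w) (w + 1) 1).foldl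
        (fun occupied dy => PySem.Set.add occupied (sx + dx, sy + dy))
        occupied)
    PySem.Set.empty

-- ===== PRECONDITION & SPEC =====
def Spec_mark_occupied (sensor : Int × Int) (beacon : Int × Int) (distance : Int) (out : List (Int × Int)) : Prop := out = mark_occupied_alt sensor beacon distance
instance (sensor : Int × Int) (beacon : Int × Int) (distance : Int) (out : List (Int × Int)) : Decidable (Spec_mark_occupied sensor beacon distance out) := by unfold Spec_mark_occupied; infer_instance

-- ===== CLAIM (what is proved, stated in full; the proofs are below) =====
def Claim_equal_mark_occupied : Prop := ∀ (sensor : Int × Int) (beacon : Int × Int) (distance : Int), Dom_mark_occupied sensor beacon distance → Spec_mark_occupied sensor beacon distance (mark_occupied sensor beacon distance)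

-- ===== LEMMAS AND PROOFS =====

-- filtering the full range by |x| + |y| ≤ d leaves exactly the closed-form row range
lemma filter_diamond (d x : Int) (hx : |x| ≤ d) :
    (PySem.List.pyRange (-d) (d + 1) 1).filter (fun y => decide (|x| + |y| ≤ d))
      = PySem.List.pyRange (-(d - |x|)) ((d - |x|) + 1) 1 := by
  have hx0 : (0 : Int) ≤ |x| := abs_nonneg x
  rw [PySem.List.pyRange_one_append (-d) (-(d - |x|)) (d + 1) (by omega) (by omega),
      PySem.List.pyRange_one_append (-(d - |x|)) ((d - |x|) + 1) (d + 1) (by omega) (by omega),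
      List.filter_append, List.filter_append]
  have e1 : (PySem.List.pyRange (-d) (-(d - |x|)) 1).filter (fun y => decide (|x| + |y| ≤ d)) = [] := by
    apply List.filter_eq_nil_iff.mpr
    intro y hy
    rw [PySem.List.mem_pyRange_one] at hy
    simp only [decide_eq_true_eq, Int.abs_eq_natAbs] at *
    omega
  have e2 : (PySem.List.pyRange (-(d - |x|)) ((d - |x|) + 1) 1).filter (fun y => decide (|x| + |y| ≤ d))
      = PySem.List.pyRange (-(d - |x|)) ((d - |x|) + 1) 1 := by
    apply List.filter_eq_self.mpr
    intro y hy
    rw [PySem.List.mem_pyRange_one] at hy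
    simp only [decide_eq_true_eq, Int.abs_eq_natAbs] at *
    omega
  have e3 : (PySem.List.pyRange ((d - |x|) + 1) (d + 1) 1).filter (fun y => decide (|x| + |y| ≤ d)) = [] := by
    apply List.filter_eq_nil_iff.mpr
    intro y hy
    rw [PySem.List.mem_pyRange_one] at hy
    simp only [decide_eq_true_eq, Int.abs_eq_natAbs] at *
    omega
  rw [e1, e2, e3]
  simp

-- A's inner pass (full range + distance test) equals B's inner pass (closed-form range)
lemma inner_eq (sensor : Int × Int) (d x : Int) (hx : |x| ≤ d) (occ : List (Int × Int)) :
    (PySem.List.pyRange (-d) (d + 1) 1).foldl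
        (fun occupied y =>
          let candidate := add_tuples sensor (x, y)
          if taxicab_dist candidate sensor ≤ d then PySem.Set.add occupied candidate
          else occupied)
        occ
      = (PySem.List.pyRange (-(d - |x|)) ((d - |x|) + 1) 1).foldl
        (fun occupied y => PySem.Set.add occupied (sensor.1 + x, sensor.2 + y)) occ := by
  have hbody : (fun (occupied : List (Int × Int)) (y : Int) =>
      let candidate := add_tuples sensor (x, y)
      if taxicab_dist candidate sensor ≤ d then PySem.Set.add occupied candidate else occupied)
      = fun occupied y =>
        if |x| + |y| ≤ d then PySem.Set.add occupied (sensor.1 + x, sensor.2 + y) else occupied := by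
    funext occupied y
    simp only [add_tuples, taxicab_dist, add_sub_cancel_left]
  rw [hbody,
      PySem.List.foldl_ite_eq_foldl_filter (p := fun y => |x| + |y| ≤ d)
        (f := fun occupied y => PySem.Set.add occupied (sensor.1 + x, sensor.2 + y)),
      filter_diamond d x hx]

-- ===== VERDICT (by name: the statement is the Claim_ definition above) =====
theorem mark_occupied_spec : Claim_equal_mark_occupied := by
  intro sensor beacon distance _
  unfold Spec_mark_occupied mark_occupied mark_occupied_alt
  apply PySem.List.foldl_congr_mem
  intro occ x hxmem
  rw [PySem.List.mem_pyRange_one] at hxmem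
  have hx : |x| ≤ distance := by
    simp only [Int.abs_eq_natAbs] at *
    omega
  exact inner_eq sensor distance x hx occ
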